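-- pv_equiv track=rewrite | github.com/johaning91/criptografia | criptosistemas.py | reparte_grupos
-- ===== SOURCE A (Python) =====
-- def reparte_grupos(texto):
--     indice = 1
--     grupo1=""
--     grupo2=""
--     for caracter in texto:
--         if indice%2 != 0:
--             grupo1+=chr(caracter)
--         else:
--             grupo2+=chr(caracter)
--         indice += 1
--     return grupo1,grupo2
-- ===== SOURCE B (Python) =====
-- def reparte_grupos(texto):
--     grupo1 = "".join(chr(c) for c in texto[::2])
--     grupo2 = "".join(chr(c) for c in texto[1::2])
--     return grupo1, grupo2
-- ===== Notes on version B (the rewrite author's own statement) =====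
-- stated objective: idiomatic
-- what changed: The single branched pass with a parity counter is replaced by two stride-2 passes: grupo1 is built from texto[::2] and grupo2 from texto[1::2], each mapped through chr and joined; no index variable and no parity test remain.
import Mathlib
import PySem

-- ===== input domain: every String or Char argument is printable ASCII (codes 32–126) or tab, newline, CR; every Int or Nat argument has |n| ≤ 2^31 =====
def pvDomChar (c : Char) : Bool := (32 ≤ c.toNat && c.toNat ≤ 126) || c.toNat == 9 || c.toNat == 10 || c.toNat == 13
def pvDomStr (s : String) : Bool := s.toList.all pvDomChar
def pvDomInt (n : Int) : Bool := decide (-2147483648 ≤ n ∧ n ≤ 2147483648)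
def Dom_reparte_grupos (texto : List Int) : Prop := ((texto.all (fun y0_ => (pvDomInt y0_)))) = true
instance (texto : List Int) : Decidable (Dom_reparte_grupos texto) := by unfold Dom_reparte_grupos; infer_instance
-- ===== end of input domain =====

-- B builds the two groups from stride-2 slices (texto[::2] / texto[1::2]) instead of A's
-- single pass with a parity counter; objective: idiomatic, same O(n) cost.


-- Python chr(c) on a valid, non-surrogate code point
def pyChr (c : Int) : Char := Char.ofNat c.toNat

-- ===== PORT A =====
-- literal port of A: one fold over texto carrying (indice, grupo1, grupo2)
def reparte_grupos (texto : List Int) : String × String :=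
  let st := texto.foldl
    (fun (s : Int × String × String) caracter =>
      if PySem.Int.mod s.1 2 ≠ 0 then (s.1 + 1, s.2.1.push (pyChr caracter), s.2.2)
      else (s.1 + 1, s.2.1, s.2.2.push (pyChr caracter)))
    (1, "", "")
  (st.2.1, st.2.2)

-- ===== PORT B =====
-- texto[::2]: every second element starting at position 0 (texto[1::2] is stride2 of the tail)
def stride2 : List Int → List Int
  | [] => []
  | [c] => [c]
  | c :: _ :: r => c :: stride2 r

def reparte_grupos_alt (texto : List Int) : String × String :=
  (String.ofList ((stride2 texto).map pyChr),
   String.ofList ((stride2 (texto.drop 1)).map pyChr))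

-- ===== PRECONDITION & SPEC =====
-- Pre_ excludes elements outside [0, 0x10FFFF], where Python's chr raises ValueError, and the
-- surrogate code points [0xD800, 0xDFFF], on which chr returns a lone surrogate that a Lean
-- Char/String cannot represent (both programs behave identically there).
def Pre_reparte_grupos (texto : List Int) : Prop :=
  texto.all (fun c => decide (0 ≤ c ∧ c < 1114112 ∧ (c < 55296 ∨ 57344 ≤ c))) = true
instance (texto : List Int) : Decidable (Pre_reparte_grupos texto) := by
  unfold Pre_reparte_grupos; infer_instance
def pvWitness_reparte_grupos : List Int := [72, 111, 108, 97]

def Spec_reparte_grupos (texto : List Int) (out : String × String) : Prop := out = reparte_grupos_alt texto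
instance (texto : List Int) (out : String × String) : Decidable (Spec_reparte_grupos texto out) := by unfold Spec_reparte_grupos; infer_instance

-- ===== CLAIM (what is proved, stated in full; the proofs are below) =====
def Claim_equal_reparte_grupos : Prop := ∀ (texto : List Int), Dom_reparte_grupos texto → Pre_reparte_grupos texto → Spec_reparte_grupos texto (reparte_grupos texto)

-- ===== LEMMAS AND PROOFS =====
theorem stride2_cons (c : Int) (r : List Int) :
    stride2 (c :: r) = c :: stride2 (r.drop 1) := by
  cases r <;> simp [stride2]

theorem push_append_ofList (s : String) (a : Char) (l : List Char) :
    (s.push a) ++ String.ofList l = s ++ String.ofList (a :: l) := by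
  apply String.toList_inj.mp
  simp

theorem mod_succ_flip (i : Int) :
    (PySem.Int.mod (i + 1) 2 ≠ 0) ↔ ¬ (PySem.Int.mod i 2 ≠ 0) := by
  simp only [PySem.Int.mod, Int.fmod_eq_emod]; omega

-- characterisation of A's fold from an arbitrary state: an odd counter sends the head to
-- grupo1 and further elements alternate, so the two groups are the two stride-2 sublists
theorem foldA_char (texto : List Int) : ∀ (i : Int) (g1 g2 : String),
    texto.foldl
      (fun (s : Int × String × String) caracter =>
        if PySem.Int.mod s.1 2 ≠ 0 then (s.1 + 1, s.2.1.push (pyChr caracter), s.2.2)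
        else (s.1 + 1, s.2.1, s.2.2.push (pyChr caracter)))
      (i, g1, g2)
    = (i + texto.length,
       (if PySem.Int.mod i 2 ≠ 0
        then (g1 ++ String.ofList ((stride2 texto).map pyChr),
              g2 ++ String.ofList ((stride2 (texto.drop 1)).map pyChr))
        else (g1 ++ String.ofList ((stride2 (texto.drop 1)).map pyChr),
              g2 ++ String.ofList ((stride2 texto).map pyChr)))) := by
  induction texto with
  | nil => intro i g1 g2; split <;> simp [stride2]
  | cons c r ih =>
    intro i g1 g2
    simp only [List.foldl_cons]
    by_cases h : PySem.Int.mod i 2 ≠ 0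
    · rw [if_pos h, ih, if_neg (fun hh => ((mod_succ_flip i).mp hh) h), if_pos h,
        stride2_cons]
      simp only [List.drop_one, List.tail_cons, List.map_cons, ← push_append_ofList,
        List.length_cons, Prod.mk.injEq]
      exact ⟨by push_cast; omega, trivial⟩
    · rw [if_neg h, ih, if_pos ((mod_succ_flip i).mpr h), if_neg h, stride2_cons]
      simp only [List.drop_one, List.tail_cons, List.map_cons, ← push_append_ofList,
        List.length_cons, Prod.mk.injEq]
      exact ⟨by push_cast; omega, trivial⟩

-- ===== VERDICT (by name: the statement is the Claim_ definition above) =====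
theorem reparte_grupos_spec : Claim_equal_reparte_grupos := by
  intro texto _ _
  unfold Spec_reparte_grupos reparte_grupos reparte_grupos_alt
  rw [foldA_char texto 1 "" "", if_pos (by decide : PySem.Int.mod 1 2 ≠ 0)]
  simp
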